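-- pv_equiv track=rewrite | github.com/Nicolas-PLX/L-systems | csv_to_xml.py | first_index_of_param
-- ===== SOURCE A (Python) =====
-- def first_index_of_param(row):
--     actions = ["MOVE","TURN","LINE"]
--     res = -1
--     for action in actions:
--         for index,element in enumerate(row):
--             if action in element:
--                 if res != -1 and res > index:
--                     res = index
--                 elif res == -1:
--                     res = index
--     return res
-- ===== SOURCE B (Python) =====
-- def first_index_of_param(row):
--     for index, element in enumerate(row):
--         if any(a in element for a in ("MOVE", "TURN", "LINE")):
--             return index
--     return -1
-- ===== Notes on version B (the rewrite author's own statement) =====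
-- stated objective: simpler
-- what changed: Replaces A's three full scans (one per keyword) with min-index/sentinel bookkeeping by a single ordered pass over the row that returns the first index whose element contains any keyword.
import Mathlib
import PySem

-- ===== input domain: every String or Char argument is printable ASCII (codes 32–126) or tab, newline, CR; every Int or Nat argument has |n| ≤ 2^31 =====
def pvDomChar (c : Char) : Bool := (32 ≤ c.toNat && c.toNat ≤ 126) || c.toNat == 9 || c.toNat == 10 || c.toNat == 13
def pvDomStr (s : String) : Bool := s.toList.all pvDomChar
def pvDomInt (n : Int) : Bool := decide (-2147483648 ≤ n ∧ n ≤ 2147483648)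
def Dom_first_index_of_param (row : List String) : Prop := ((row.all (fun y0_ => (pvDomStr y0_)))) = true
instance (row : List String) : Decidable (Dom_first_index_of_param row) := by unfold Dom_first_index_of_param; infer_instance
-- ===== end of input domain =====

-- B replaces A's three full keyword scans with min-index bookkeeping by one early-exit pass; objective: simpler.


-- ===== PORT A =====
def first_index_of_param (row : List String) : Int :=
  let actions : List String := ["MOVE", "TURN", "LINE"]
  actions.foldl (fun res action =>
    (PySem.List.enumerate row).foldl (fun res p =>
      if PySem.Str.isIn action p.2 then
        if res ≠ -1 ∧ res > p.1 then p.1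
        else if res = -1 then p.1
        else res
      else res) res) (-1)

-- ===== PORT B =====
def pvQual (e : String) : Bool := ["MOVE", "TURN", "LINE"].any (fun a => PySem.Str.isIn a e)

def pvAltGo : List String → Int → Int
  | [], _ => -1
  | e :: rest, i => if pvQual e then i else pvAltGo rest (i + 1)

def first_index_of_param_alt (row : List String) : Int := pvAltGo row 0

-- ===== PRECONDITION & SPEC =====
def Spec_first_index_of_param (row : List String) (out : Int) : Prop := out = first_index_of_param_alt row
instance (row : List String) (out : Int) : Decidable (Spec_first_index_of_param row out) := by unfold Spec_first_index_of_param; infer_instance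

-- ===== CLAIM (what is proved, stated in full; the proofs are below) =====
def Claim_equal_first_index_of_param : Prop := ∀ (row : List String), Dom_first_index_of_param row → Spec_first_index_of_param row (first_index_of_param row)

-- ===== LEMMAS AND PROOFS =====

-- min with -1 as "no result yet" sentinel (the combining operation A's update realises)
def pvMinS (x j : Int) : Int := if j = -1 then x else if x = -1 then j else min x j

-- first index ≥ k (as an offset into cs) whose element satisfies p, else -1
def pvFidx (p : String → Bool) : List String → Nat → Int
  | [], _ => -1
  | e :: rest, k => if p e then (k : Int) else pvFidx p rest (k + 1)

lemma pvFidx_lb (p : String → Bool) (cs : List String) (k : Nat) :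
    pvFidx p cs k = -1 ∨ (k : Int) ≤ pvFidx p cs k := by
  induction cs generalizing k with
  | nil => left; rfl
  | cons c rest ih =>
    simp only [pvFidx]
    split
    · right; omega
    · rcases ih (k + 1) with h | h
      · left; exact h
      · right; push_cast at h ⊢; omega

lemma pvMinS_left (x j : Int) (hx : x ≠ -1) (h : j = -1 ∨ x ≤ j) : pvMinS x j = x := by
  unfold pvMinS
  simp only [min_def]
  rcases h with h | h
  · simp [h]
  · split_ifs <;> first | exact (False.elim ‹False›) | omega

lemma inner_eq (a : String) (cs : List String) (k : Nat) (res : Int)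
    (h : res = -1 ∨ 0 ≤ res) :
    ((PySem.List.enumerate cs (k : Int)).foldl (fun res p =>
      if PySem.Str.isIn a p.2 then
        if res ≠ -1 ∧ res > p.1 then p.1
        else if res = -1 then p.1
        else res
      else res) res) = pvMinS res (pvFidx (fun e => PySem.Str.isIn a e) cs k) := by
  induction cs generalizing k res with
  | nil => simp [PySem.List.enumerate, pvFidx, pvMinS]
  | cons c rest ih =>
    have henum : PySem.List.enumerate (c :: rest) (k : Int)
        = ((k : Int), c) :: PySem.List.enumerate rest ((k : Int) + 1) := by
      simp [PySem.List.enumerate]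
    rw [henum]
    simp only [List.foldl_cons, pvFidx]
    by_cases hc : PySem.Str.isIn a c
    · simp only [hc, if_true]
      have hstep : (if res ≠ -1 ∧ res > (k : Int) then (k : Int)
          else if res = -1 then (k : Int) else res) = pvMinS res (k : Int) := by
        unfold pvMinS; simp only [min_def]; split_ifs <;> first | exact (False.elim ‹False›) | omega
      rw [hstep]
      have hcast : ((k : Int) + 1) = ((k + 1 : Nat) : Int) := by push_cast; ring
      rw [hcast, ih (k + 1) (pvMinS res (k : Int)) (by unfold pvMinS; simp only [min_def]; right; split_ifs <;> first | exact (False.elim ‹False›) | omega)]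
      have hub : pvMinS res (k : Int) ≤ (k : Int) := by
        unfold pvMinS; simp only [min_def]; split_ifs <;> first | exact (False.elim ‹False›) | omega
      have hne : pvMinS res (k : Int) ≠ -1 := by
        unfold pvMinS; simp only [min_def]; split_ifs <;> first | exact (False.elim ‹False›) | omega
      rw [pvMinS_left _ _ hne]
      rcases pvFidx_lb (fun e => PySem.Str.isIn a e) rest (k + 1) with h1 | h1
      · left; exact h1
      · right; push_cast at h1; omega
    · simp only [hc, if_false, Bool.false_eq_true]
      have hcast : ((k : Int) + 1) = ((k + 1 : Nat) : Int) := by push_cast; ring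
      rw [hcast, ih (k + 1) res h]

lemma altGo_eq (cs : List String) (k : Nat) :
    pvAltGo cs (k : Int) = pvFidx pvQual cs k := by
  induction cs generalizing k with
  | nil => rfl
  | cons c rest ih =>
    simp only [pvAltGo, pvFidx]
    split
    · rfl
    · have hcast : ((k : Int) + 1) = ((k + 1 : Nat) : Int) := by push_cast; ring
      rw [hcast, ih (k + 1)]

lemma pvFidx_congr (p q : String → Bool) (h : ∀ e, p e = q e) (cs : List String) (k : Nat) :
    pvFidx p cs k = pvFidx q cs k := by
  induction cs generalizing k with
  | nil => rfl
  | cons c rest ih => simp only [pvFidx, h c]; split <;> [rfl; exact ih (k + 1)]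

lemma pvFidx_or (p q : String → Bool) (cs : List String) (k : Nat) :
    pvFidx (fun e => p e || q e) cs k = pvMinS (pvFidx p cs k) (pvFidx q cs k) := by
  induction cs generalizing k with
  | nil => rfl
  | cons c rest ih =>
    simp only [pvFidx]
    by_cases hp : p c <;> by_cases hq : q c <;>
      simp only [hp, hq, Bool.true_or, Bool.false_or, Bool.or_false, if_true, if_false,
        Bool.false_eq_true, ih (k + 1)]
    · unfold pvMinS; simp only [min_def]; split_ifs <;> first | exact (False.elim ‹False›) | omega
    · rcases pvFidx_lb q rest (k + 1) with h | h <;>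
        · unfold pvMinS; simp only [min_def]; push_cast at h ⊢; split_ifs <;> first | exact (False.elim ‹False›) | omega
    · rcases pvFidx_lb p rest (k + 1) with h | h <;>
        · unfold pvMinS; simp only [min_def]; push_cast at h ⊢; split_ifs <;> first | exact (False.elim ‹False›) | omega

lemma pvMinS_assoc (x y z : Int) : pvMinS (pvMinS x y) z = pvMinS x (pvMinS y z) := by
  unfold pvMinS; simp only [min_def]; split_ifs <;> first | exact (False.elim ‹False›) | omega

lemma pvMinS_neg_one (j : Int) : pvMinS (-1) j = j := by
  unfold pvMinS; simp only [min_def]; split_ifs <;> first | exact (False.elim ‹False›) | omega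

-- ===== VERDICT (by name: the statement is the Claim_ definition above) =====
theorem first_index_of_param_spec : Claim_equal_first_index_of_param := by
  intro row _
  unfold Spec_first_index_of_param first_index_of_param first_index_of_param_alt
  have h0 : (0 : Int) = ((0 : Nat) : Int) := rfl
  simp only [List.foldl_cons, List.foldl_nil]
  have hM := pvFidx_lb (fun e => PySem.Str.isIn "MOVE" e) row 0
  have hT := pvFidx_lb (fun e => PySem.Str.isIn "TURN" e) row 0
  have hL := pvFidx_lb (fun e => PySem.Str.isIn "LINE" e) row 0
  rw [show (PySem.List.enumerate row) = PySem.List.enumerate row ((0 : Nat) : Int) from rfl]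
  rw [inner_eq "MOVE" row 0 (-1) (Or.inl rfl), pvMinS_neg_one]
  rw [inner_eq "TURN" row 0 _ (by tauto)]
  rw [inner_eq "LINE" row 0 _ (by
    rcases hM with h | h <;> rcases hT with h' | h' <;>
      (unfold pvMinS; simp only [min_def]; split_ifs <;> first | exact (False.elim ‹False›) | omega))]
  rw [h0, altGo_eq row 0]
  rw [pvFidx_congr pvQual
    (fun e => PySem.Str.isIn "MOVE" e || (PySem.Str.isIn "TURN" e || PySem.Str.isIn "LINE" e))
    (by intro e; simp [pvQual]) row 0]
  rw [pvFidx_or, pvFidx_or, pvMinS_assoc]
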